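-- pv_equiv track=rewrite | github.com/mauboro/my_katas | stringy_strings/python/main.py | stringy
-- ===== SOURCE A (Python) =====
-- def stringy(size):
--     res = ""
--     shift = 1
--     for i in range(size):
--         if shift == 1:
--             res += "1"
--             shift = 0
--         elif shift == 0:
--             res += "0"
--             shift = 1
--     return res
-- ===== SOURCE B (Python) =====
-- def stringy(size):
--     return ("10" * ((size + 1) // 2))[:size]
-- ===== Notes on version B (the rewrite author's own statement) =====
-- stated objective: simpler
-- what changed: Replaces the character-by-character loop with a toggle flag by a closed-form construction: repeat "10" ceil(size/2) times and slice to [:size].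
import Mathlib
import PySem

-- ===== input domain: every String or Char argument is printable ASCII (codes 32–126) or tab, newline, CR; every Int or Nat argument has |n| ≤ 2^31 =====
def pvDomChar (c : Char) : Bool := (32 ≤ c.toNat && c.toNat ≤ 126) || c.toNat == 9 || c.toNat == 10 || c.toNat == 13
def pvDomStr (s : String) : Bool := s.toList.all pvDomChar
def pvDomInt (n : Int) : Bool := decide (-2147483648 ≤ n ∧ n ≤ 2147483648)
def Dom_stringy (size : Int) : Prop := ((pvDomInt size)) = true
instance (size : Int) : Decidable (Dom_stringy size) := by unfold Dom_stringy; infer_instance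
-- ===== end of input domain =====

-- B replaces A's character-by-character toggle loop by a closed form: repeat "10" ⌈size/2⌉ times and slice to [:size].


-- ===== PORT A =====
-- res accumulated as List Char (Python str concatenation, on the list side), String.mk at the end
def stringy (size : Int) : String :=
  let st := (PySem.List.pyRange 0 size 1).foldl
    (fun (st : List Char × Int) _i =>
      if st.2 = 1 then (st.1 ++ ['1'], 0)
      else if st.2 = 0 then (st.1 ++ ['0'], 1)
      else st)
    ([], 1)
  String.mk st.1

-- ===== PORT B =====
-- "10" * n ported as flatten of replicate (repetition count ≤ 0 gives "", as in Python); [:size] is slice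
def stringy_alt (size : Int) : String :=
  String.mk (PySem.List.slice
    (List.flatten (List.replicate (PySem.Int.floordiv (size + 1) 2).toNat ['1', '0']))
    none (some size))

-- ===== PRECONDITION & SPEC =====
def Spec_stringy (size : Int) (out : String) : Prop := out = stringy_alt size
instance (size : Int) (out : String) : Decidable (Spec_stringy size out) := by unfold Spec_stringy; infer_instance

-- ===== CLAIM (what is proved, stated in full; the proofs are below) =====
def Claim_equal_stringy : Prop := ∀ (size : Int), Dom_stringy size → Spec_stringy size (stringy size)

-- ===== LEMMAS AND PROOFS =====

/-- the alternating string: `alt n true = "1010…"` (n chars). -/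
def altChars : Nat → Bool → List Char
  | 0, _ => []
  | n + 1, b => (if b then '1' else '0') :: altChars n (!b)

def stepA (st : List Char × Int) (_i : Int) : List Char × Int :=
  if st.2 = 1 then (st.1 ++ ['1'], 0)
  else if st.2 = 0 then (st.1 ++ ['0'], 1)
  else st

theorem foldA (l : List Int) : ∀ (res : List Char) (b : Bool),
    l.foldl stepA (res, if b then 1 else 0) =
      (res ++ altChars l.length b,
       if (l.length + (if b then 0 else 1)) % 2 = 0 then 1 else 0) := by
  induction l with
  | nil => intro res b; cases b <;> simp [altChars]
  | cons x l ih =>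
    intro res b
    have h1 : stepA (res, if b then 1 else 0) x =
        (res ++ [if b then '1' else '0'], if (!b) then 1 else 0) := by
      cases b <;> simp [stepA]
    simp only [List.foldl_cons, h1, ih]
    cases b <;> simp [altChars] <;> omega

theorem altChars_take : ∀ (n m : Nat) (b : Bool), n ≤ m →
    List.take n (altChars m b) = altChars n b := by
  intro n
  induction n with
  | zero => intro m b _; simp [altChars]
  | succ n ih =>
    intro m b h
    cases m with
    | zero => omega
    | succ m => simp [altChars, ih m (!b) (by omega)]

theorem flatten_replicate_alt : ∀ (m : Nat),
    List.flatten (List.replicate m ['1', '0']) = altChars (2 * m) true := by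
  intro m
  induction m with
  | zero => simp [altChars]
  | succ m ih =>
    have : 2 * (m + 1) = 2 * m + 1 + 1 := by omega
    rw [this]; simp [List.replicate_succ, altChars, ih]

-- ===== VERDICT (by name: the statement is the Claim_ definition above) =====
theorem stringy_spec : Claim_equal_stringy := by
  intro size _
  unfold Spec_stringy stringy stringy_alt
  by_cases hpos : 0 < size
  · -- positive size: both are the alternating string of length size
    have hfd : (PySem.Int.floordiv (size + 1) 2).toNat = (size.toNat + 1) / 2 := by
      rw [PySem.Int.floordiv_eq_ediv_of_pos (by omega)]
      omega
    have hA := foldA (PySem.List.pyRange 0 size 1) [] true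
    have hlen : (PySem.List.pyRange 0 size 1).length = size.toNat := by
      rw [PySem.List.length_pyRange_one]; omega
    simp only [hlen, if_true] at hA
    show String.mk ((PySem.List.pyRange 0 size 1).foldl stepA ([], 1)).1 = _
    rw [hA, hfd, flatten_replicate_alt]
    rw [PySem.List.slice_to _ (by omega : (0:Int) ≤ size)]
    rw [altChars_take _ _ _ (by omega)]
    simp
  · -- size ≤ 0: the loop body never runs, the repetition count is ≤ 0
    have h1 : PySem.List.pyRange 0 size 1 = [] :=
      PySem.List.pyRange_one_eq_nil (by omega)
    have h2 : (PySem.Int.floordiv (size + 1) 2).toNat = 0 := by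
      rw [PySem.Int.floordiv_eq_ediv_of_pos (by omega)]
      omega
    have h2' : ((size + 1) / 2).toNat = 0 := by omega
    show String.mk ((PySem.List.pyRange 0 size 1).foldl stepA ([], 1)).1 = _
    simp [h1, h2', PySem.List.slice]
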